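-- pv_equiv track=rewrite | github.com/emreCanbazoglu/pixel-sort-level-designer | psld/sim.py | _row_col_extrema
-- ===== SOURCE A (Python) =====
-- def _row_col_extrema(slots: list[list[int | None]]) -> tuple[list[int | None], list[int | None], list[int | None], list[int | None]]:
--     h = len(slots)
--     w = len(slots[0]) if h else 0
--     row_min: list[int | None] = [None for _ in range(h)]
--     row_max: list[int | None] = [None for _ in range(h)]
--     col_min: list[int | None] = [None for _ in range(w)]
--     col_max: list[int | None] = [None for _ in range(w)]
--
--     for y in range(h):
--         for x in range(w):
--             if slots[y][x] is None:
--                 continue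
--             mn = row_min[y]
--             mx = row_max[y]
--             row_min[y] = x if mn is None else min(mn, x)
--             row_max[y] = x if mx is None else max(mx, x)
--
--             mn = col_min[x]
--             mx = col_max[x]
--             col_min[x] = y if mn is None else min(mn, y)
--             col_max[x] = y if mx is None else max(mx, y)
--
--     return row_min, row_max, col_min, col_max
-- ===== SOURCE B (Python) =====
-- def _row_col_extrema(slots):
--     h = len(slots)
--     w = len(slots[0]) if h else 0
--
--     def first_last(idxs):
--         return (idxs[0], idxs[-1]) if idxs else (None, None)
--
--     rows = [first_last([x for x in range(w) if slots[y][x] is not None])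
--             for y in range(h)]
--     cols = [first_last([y for y in range(h) if slots[y][x] is not None])
--             for x in range(w)]
--
--     row_min = [p[0] for p in rows]
--     row_max = [p[1] for p in rows]
--     col_min = [p[0] for p in cols]
--     col_max = [p[1] for p in cols]
--     return row_min, row_max, col_min, col_max
-- ===== Notes on version B (the rewrite author's own statement) =====
-- stated objective: alternative
-- what changed: Replaces A's single interleaved pass that mutates four arrays with four-way min/max updates per cell by two independent passes: a row-major pass gathering each row's non-None column indices (first/last give min/max) and a column-major pass gathering each column's non-None row indices.
import Mathlib
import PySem

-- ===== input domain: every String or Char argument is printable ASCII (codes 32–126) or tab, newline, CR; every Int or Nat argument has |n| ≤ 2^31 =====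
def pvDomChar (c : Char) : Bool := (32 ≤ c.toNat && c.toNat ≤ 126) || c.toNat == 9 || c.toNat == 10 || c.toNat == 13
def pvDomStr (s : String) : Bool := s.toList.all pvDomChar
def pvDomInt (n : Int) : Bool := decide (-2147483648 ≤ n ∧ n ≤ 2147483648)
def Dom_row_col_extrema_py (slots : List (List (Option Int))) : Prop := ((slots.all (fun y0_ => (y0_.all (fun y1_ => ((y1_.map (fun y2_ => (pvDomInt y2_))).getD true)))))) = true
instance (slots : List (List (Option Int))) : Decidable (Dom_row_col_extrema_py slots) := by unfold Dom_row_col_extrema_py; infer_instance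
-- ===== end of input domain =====

-- B replaces A's single interleaved four-way-update pass by two independent passes
-- (a row-major pass and a column-major pass), each gathering the non-None indices
-- and taking first/last; same cost, different decomposition (objective: alternative).

-- ===== PORT A =====
-- slots[y][x] ported as nested getD: exact whenever the indices are in range, which
-- Pre_ guarantees (y < h always; x < w ≤ row length under Pre_); out of range Python
-- raises IndexError and those inputs are excluded by Pre_.
def pvGet (slots : List (List (Option Int))) (y x : Nat) : Option Int :=
  (slots.getD y []).getD x none

def pvW (slots : List (List (Option Int))) : Nat :=
  match slots with
  | [] => 0
  | r :: _ => r.length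

-- body of A's inner loop over x, for fixed row y; state = (row_min, row_max, col_min, col_max)
def pvStep (slots : List (List (Option Int))) (y : Nat)
    (st : List (Option Int) × List (Option Int) × List (Option Int) × List (Option Int))
    (x : Nat) :
    List (Option Int) × List (Option Int) × List (Option Int) × List (Option Int) :=
  match pvGet slots y x with
  | none => st
  | some _ =>
    (st.1.set y (match st.1.getD y none with
                 | none => some (x : Int)
                 | some mn => some (min mn (x : Int))),
     st.2.1.set y (match st.2.1.getD y none with
                   | none => some (x : Int)
                   | some mx => some (max mx (x : Int))),
     st.2.2.1.set x (match st.2.2.1.getD x none with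
                     | none => some (y : Int)
                     | some mn => some (min mn (y : Int))),
     st.2.2.2.set x (match st.2.2.2.getD x none with
                     | none => some (y : Int)
                     | some mx => some (max mx (y : Int))))

def row_col_extrema_py (slots : List (List (Option Int))) :
    List (Option Int) × List (Option Int) × List (Option Int) × List (Option Int) :=
  let h := slots.length
  let w := pvW slots
  (List.range h).foldl (fun st y => (List.range w).foldl (pvStep slots y) st)
    (List.replicate h none, List.replicate h none, List.replicate w none, List.replicate w none)

-- ===== PORT B =====
def pvHas (slots : List (List (Option Int))) (y x : Nat) : Bool :=
  (pvGet slots y x).isSome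

-- (idxs[0], idxs[-1]) if idxs else (None, None)
def pvFirstLast (xs : List Nat) : Option Int × Option Int :=
  (xs.head?.map (fun n => (n : Int)), xs.getLast?.map (fun n => (n : Int)))

def row_col_extrema_py_alt (slots : List (List (Option Int))) :
    List (Option Int) × List (Option Int) × List (Option Int) × List (Option Int) :=
  let h := slots.length
  let w := pvW slots
  let rows := (List.range h).map
      (fun y => pvFirstLast ((List.range w).filter (fun x => pvHas slots y x)))
  let cols := (List.range w).map
      (fun x => pvFirstLast ((List.range h).filter (fun y => pvHas slots y x)))
  (rows.map Prod.fst, rows.map Prod.snd, cols.map Prod.fst, cols.map Prod.snd)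

-- ===== PRECONDITION & SPEC =====
-- Pre_ excludes ragged grids in which some row is shorter than row 0: there Python A
-- (and Python B alike) raises IndexError instead of returning.
def Pre_row_col_extrema_py (slots : List (List (Option Int))) : Prop :=
  ∀ row ∈ slots, pvW slots ≤ row.length

instance (slots : List (List (Option Int))) : Decidable (Pre_row_col_extrema_py slots) := by
  unfold Pre_row_col_extrema_py; infer_instance

def pvWitness_row_col_extrema_py : List (List (Option Int)) :=
  [[some 1, none], [none, some 2]]

def Spec_row_col_extrema_py (slots : List (List (Option Int))) (out : List (Option Int) × List (Option Int) × List (Option Int) × List (Option Int)) : Prop := out = row_col_extrema_py_alt slots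
instance (slots : List (List (Option Int))) (out : List (Option Int) × List (Option Int) × List (Option Int) × List (Option Int)) : Decidable (Spec_row_col_extrema_py slots out) := by unfold Spec_row_col_extrema_py; infer_instance

-- ===== CLAIM (what is proved, stated in full; the proofs are below) =====
def Claim_equal_row_col_extrema_py : Prop := ∀ (slots : List (List (Option Int))), Dom_row_col_extrema_py slots → Pre_row_col_extrema_py slots → Spec_row_col_extrema_py slots (row_col_extrema_py slots)

-- ===== LEMMAS AND PROOFS =====

-- row y's non-None column indices among the first n columns
def pvRF (slots : List (List (Option Int))) (y n : Nat) : List Nat :=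
  (List.range n).filter (fun x => pvHas slots y x)

-- column x's non-None row indices among the first k rows
def pvCF (slots : List (List (Option Int))) (x k : Nat) : List Nat :=
  (List.range k).filter (fun y => pvHas slots y x)

theorem getD_set (l : List (Option Int)) (k : Nat) (v : Option Int) (z : Nat) :
    (l.set k v).getD z none = if z = k ∧ k < l.length then v else l.getD z none := by
  by_cases hk : z = k ∧ k < l.length
  · obtain ⟨rfl, hlt⟩ := hk
    simp [List.getD_eq_getElem?_getD, hlt]
  · simp only [List.getD_eq_getElem?_getD, if_neg hk]
    rcases Decidable.em (z = k) with rfl | hne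
    · have h2 : ¬ z < l.length := fun h => hk ⟨rfl, h⟩
      rw [List.getElem?_eq_none (by simpa using h2), List.getElem?_eq_none (by omega)]
    · rw [List.getElem?_set_ne (by omega)]

theorem head?_append_or {α : Type} (l l' : List α) : (l ++ l').head? = l.head?.or l'.head? :=
  List.head?_append

theorem getLast?_append_or {α : Type} (l l' : List α) :
    (l ++ l').getLast? = l'.getLast?.or l.getLast? := by
  cases l' with
  | nil => simp
  | cons a t => simp [List.getLast?_append]

theorem pvRF_succ (slots : List (List (Option Int))) (y n : Nat) :
    pvRF slots y (n + 1) = pvRF slots y n ++ (if pvHas slots y n then [n] else []) := by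
  simp only [pvRF, List.range_succ, List.filter_append, List.filter_cons, List.filter_nil]

theorem pvCF_succ (slots : List (List (Option Int))) (x k : Nat) :
    pvCF slots x (k + 1) = pvCF slots x k ++ (if pvHas slots k x then [k] else []) := by
  simp only [pvCF, List.range_succ, List.filter_append, List.filter_cons, List.filter_nil]

theorem pvRF_head_lt (slots : List (List (Option Int))) (y n m : Nat)
    (h : (pvRF slots y n).head? = some m) : m < n := by
  have hm : m ∈ pvRF slots y n := List.mem_of_mem_head? h
  have := List.of_mem_filter hm
  have hr : m ∈ List.range n := List.mem_of_mem_filter hm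
  simpa using hr

theorem pvCF_head_lt (slots : List (List (Option Int))) (x k m : Nat)
    (h : (pvCF slots x k).head? = some m) : m < k := by
  have hm : m ∈ pvCF slots x k := List.mem_of_mem_head? h
  have hr : m ∈ List.range k := List.mem_of_mem_filter hm
  simpa using hr

theorem getD_replicate_none (m z : Nat) :
    (List.replicate m (none : Option Int)).getD z none = none := by
  by_cases h : z < m <;>
    simp [List.getD_eq_getElem?_getD, h]

theorem inner_fold (slots : List (List (Option Int))) (y n : Nat)
    (rm rx cm cx : List (Option Int))
    (hrm : rm.getD y none = none) (hrx : rx.getD y none = none)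
    (hcm : ∀ z v, cm.getD z none = some v → v < (y : Int))
    (hcx : ∀ z v, cx.getD z none = some v → v < (y : Int)) :
    ((List.range n).foldl (pvStep slots y) (rm, rx, cm, cx)).1.length = rm.length ∧
    ((List.range n).foldl (pvStep slots y) (rm, rx, cm, cx)).2.1.length = rx.length ∧
    ((List.range n).foldl (pvStep slots y) (rm, rx, cm, cx)).2.2.1.length = cm.length ∧
    ((List.range n).foldl (pvStep slots y) (rm, rx, cm, cx)).2.2.2.length = cx.length ∧
    (∀ z, ((List.range n).foldl (pvStep slots y) (rm, rx, cm, cx)).1.getD z none =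
      if z = y ∧ y < rm.length then (pvRF slots y n).head?.map (fun m => (m : Int))
      else rm.getD z none) ∧
    (∀ z, ((List.range n).foldl (pvStep slots y) (rm, rx, cm, cx)).2.1.getD z none =
      if z = y ∧ y < rx.length then (pvRF slots y n).getLast?.map (fun m => (m : Int))
      else rx.getD z none) ∧
    (∀ z, ((List.range n).foldl (pvStep slots y) (rm, rx, cm, cx)).2.2.1.getD z none =
      if z < n ∧ z < cm.length ∧ pvHas slots y z then
        (if cm.getD z none = none then some (y : Int) else cm.getD z none)
      else cm.getD z none) ∧
    (∀ z, ((List.range n).foldl (pvStep slots y) (rm, rx, cm, cx)).2.2.2.getD z none =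
      if z < n ∧ z < cx.length ∧ pvHas slots y z then some (y : Int)
      else cx.getD z none) := by
  induction n with
  | zero =>
    refine ⟨rfl, rfl, rfl, rfl, ?_, ?_, ?_, ?_⟩ <;> intro z
    · simp only [List.range_zero, List.foldl_nil, pvRF, List.filter_nil,
        List.head?_nil]
      split_ifs with h
      · obtain ⟨rfl, _⟩ := h; exact hrm
      · rfl
    · simp only [List.range_zero, List.foldl_nil, pvRF, List.filter_nil,
        List.getLast?_nil]
      split_ifs with h
      · obtain ⟨rfl, _⟩ := h; exact hrx
      · rfl
    · simp only [List.range_zero, List.foldl_nil]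
      rw [if_neg (by omega)]
    · simp only [List.range_zero, List.foldl_nil]
      rw [if_neg (by omega)]
  | succ n ih =>
    obtain ⟨L1, L2, L3, L4, H1, H2, H3, H4⟩ := ih
    rw [List.range_succ]
    simp only [List.foldl_append, List.foldl_cons, List.foldl_nil]
    set A := (List.range n).foldl (pvStep slots y) (rm, rx, cm, cx) with hA
    cases hg : pvGet slots y n with
    | none =>
      have hhas : pvHas slots y n = false := by simp [pvHas, hg]
      simp only [pvStep, hg]
      simp only [pvRF_succ, hhas, if_neg Bool.false_ne_true, List.append_nil]
      refine ⟨L1, L2, L3, L4, H1, H2, ?_, ?_⟩ <;> intro z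
      · by_cases hzn : z = n
        · subst hzn
          rw [H3 z, if_neg (by simp [hhas]), if_neg (by simp [hhas])]
        · have hiff : z < n + 1 ↔ z < n := by omega
          rw [H3 z]; simp only [hiff]
      · by_cases hzn : z = n
        · subst hzn
          rw [H4 z, if_neg (by simp [hhas]), if_neg (by simp [hhas])]
        · have hiff : z < n + 1 ↔ z < n := by omega
          rw [H4 z]; simp only [hiff]
    | some v =>
      have hhas : pvHas slots y n = true := by simp [pvHas, hg]
      simp only [pvStep, hg]
      have hRF : pvRF slots y (n + 1) = pvRF slots y n ++ [n] := by
        rw [pvRF_succ, if_pos hhas]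
      refine ⟨?_, ?_, ?_, ?_, ?_, ?_, ?_, ?_⟩
      · simpa using L1
      · simpa using L2
      · simpa using L3
      · simpa using L4
      · intro z
        rw [getD_set, L1]
        split_ifs with h
        · obtain ⟨rfl, hy⟩ := h
          rw [H1 z, if_pos ⟨rfl, hy⟩, hRF, head?_append_or]
          cases hf : (pvRF slots z n).head? with
          | none => simp
          | some m =>
            have hm : m < n := pvRF_head_lt slots z n m hf
            have : ((m : Int)) ≤ (n : Int) := by exact_mod_cast Nat.le_of_lt hm
            simp [min_eq_left this]
        · rw [H1 z, if_neg h]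
      · intro z
        rw [getD_set, L2]
        split_ifs with h
        · obtain ⟨rfl, hy⟩ := h
          rw [H2 z, if_pos ⟨rfl, hy⟩, hRF, getLast?_append_or]
          cases hf : (pvRF slots z n).getLast? with
          | none => simp
          | some m =>
            have hm : m < n := by
              have hmem : m ∈ pvRF slots z n := List.mem_of_getLast? hf
              have := List.mem_of_mem_filter hmem
              simpa using this
            have : ((m : Int)) ≤ (n : Int) := by exact_mod_cast Nat.le_of_lt hm
            simp [max_eq_right this]
        · rw [H2 z, if_neg h]
      · intro z
        rw [getD_set, L3]
        by_cases h : z = n ∧ n < cm.length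
        · obtain ⟨rfl, hn⟩ := h
          rw [if_pos ⟨rfl, hn⟩]
          have hAn : A.2.2.1.getD z none = cm.getD z none := by
            rw [H3 z, if_neg (by omega)]
          rw [hAn, if_pos ⟨by omega, hn, hhas⟩]
          cases hc : cm.getD z none with
          | none => simp
          | some mn =>
            have hlt : mn < (y : Int) := hcm z mn hc
            simp [min_eq_left (le_of_lt hlt)]
        · rw [if_neg h, H3 z]
          by_cases hzn : z = n
          · subst hzn
            have hnl : ¬ z < cm.length := fun hc => h ⟨rfl, hc⟩
            rw [if_neg (by tauto), if_neg (by tauto)]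
          · have hiff : z < n + 1 ↔ z < n := by omega
            simp only [hiff]
      · intro z
        rw [getD_set, L4]
        by_cases h : z = n ∧ n < cx.length
        · obtain ⟨rfl, hn⟩ := h
          rw [if_pos ⟨rfl, hn⟩]
          have hAn : A.2.2.2.getD z none = cx.getD z none := by
            rw [H4 z, if_neg (by omega)]
          rw [hAn, if_pos ⟨by omega, hn, hhas⟩]
          cases hc : cx.getD z none with
          | none => simp
          | some mx =>
            have hlt : mx < (y : Int) := hcx z mx hc
            simp [max_eq_right (le_of_lt hlt)]
        · rw [if_neg h, H4 z]
          by_cases hzn : z = n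
          · subst hzn
            have hnl : ¬ z < cx.length := fun hc => h ⟨rfl, hc⟩
            rw [if_neg (by tauto), if_neg (by tauto)]
          · have hiff : z < n + 1 ↔ z < n := by omega
            simp only [hiff]

theorem outer_fold (slots : List (List (Option Int))) (k : Nat) (hk : k ≤ slots.length) :
    (((List.range k).foldl (fun st y => (List.range (pvW slots)).foldl (pvStep slots y) st)
      (List.replicate slots.length none, List.replicate slots.length none,
       List.replicate (pvW slots) none, List.replicate (pvW slots) none)).1.length = slots.length) ∧
    (((List.range k).foldl (fun st y => (List.range (pvW slots)).foldl (pvStep slots y) st)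
      (List.replicate slots.length none, List.replicate slots.length none,
       List.replicate (pvW slots) none, List.replicate (pvW slots) none)).2.1.length = slots.length) ∧
    (((List.range k).foldl (fun st y => (List.range (pvW slots)).foldl (pvStep slots y) st)
      (List.replicate slots.length none, List.replicate slots.length none,
       List.replicate (pvW slots) none, List.replicate (pvW slots) none)).2.2.1.length = pvW slots) ∧
    (((List.range k).foldl (fun st y => (List.range (pvW slots)).foldl (pvStep slots y) st)
      (List.replicate slots.length none, List.replicate slots.length none,
       List.replicate (pvW slots) none, List.replicate (pvW slots) none)).2.2.2.length = pvW slots) ∧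
    (∀ z, ((List.range k).foldl (fun st y => (List.range (pvW slots)).foldl (pvStep slots y) st)
      (List.replicate slots.length none, List.replicate slots.length none,
       List.replicate (pvW slots) none, List.replicate (pvW slots) none)).1.getD z none =
      if z < k then (pvRF slots z (pvW slots)).head?.map (fun m => (m : Int)) else none) ∧
    (∀ z, ((List.range k).foldl (fun st y => (List.range (pvW slots)).foldl (pvStep slots y) st)
      (List.replicate slots.length none, List.replicate slots.length none,
       List.replicate (pvW slots) none, List.replicate (pvW slots) none)).2.1.getD z none =
      if z < k then (pvRF slots z (pvW slots)).getLast?.map (fun m => (m : Int)) else none) ∧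
    (∀ z, ((List.range k).foldl (fun st y => (List.range (pvW slots)).foldl (pvStep slots y) st)
      (List.replicate slots.length none, List.replicate slots.length none,
       List.replicate (pvW slots) none, List.replicate (pvW slots) none)).2.2.1.getD z none =
      if z < pvW slots then (pvCF slots z k).head?.map (fun m => (m : Int)) else none) ∧
    (∀ z, ((List.range k).foldl (fun st y => (List.range (pvW slots)).foldl (pvStep slots y) st)
      (List.replicate slots.length none, List.replicate slots.length none,
       List.replicate (pvW slots) none, List.replicate (pvW slots) none)).2.2.2.getD z none =
      if z < pvW slots then (pvCF slots z k).getLast?.map (fun m => (m : Int)) else none) := by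
  induction k with
  | zero =>
    refine ⟨by simp, by simp, by simp, by simp, ?_, ?_, ?_, ?_⟩ <;> intro z <;>
      simp only [List.range_zero, List.foldl_nil]
    · rw [if_neg (by omega)]; exact getD_replicate_none _ _
    · rw [if_neg (by omega)]; exact getD_replicate_none _ _
    · have hnil : pvCF slots z 0 = [] := rfl
      rw [hnil]
      simp only [List.head?_nil]
      split_ifs <;> exact getD_replicate_none _ _
    · have hnil : pvCF slots z 0 = [] := rfl
      rw [hnil]
      simp only [List.getLast?_nil]
      split_ifs <;> exact getD_replicate_none _ _
  | succ k ih =>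
    obtain ⟨L1, L2, L3, L4, H1, H2, H3, H4⟩ := ih (by omega)
    rw [List.range_succ]
    simp only [List.foldl_append, List.foldl_cons, List.foldl_nil]
    rcases hA : (List.range k).foldl (fun st y => (List.range (pvW slots)).foldl (pvStep slots y) st)
      (List.replicate slots.length none, List.replicate slots.length none,
       List.replicate (pvW slots) none, List.replicate (pvW slots) none) with ⟨a1, a2, a3, a4⟩
    rw [hA] at L1 L2 L3 L4 H1 H2 H3 H4
    simp only at L1 L2 L3 L4 H1 H2 H3 H4
    have h1 : a1.getD k none = none := by rw [H1 k, if_neg (by omega)]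
    have h2 : a2.getD k none = none := by rw [H2 k, if_neg (by omega)]
    have h3 : ∀ z v, a3.getD z none = some v → v < (k : Int) := by
      intro z v hv
      rw [H3 z] at hv
      split at hv
      · cases hf : (pvCF slots z k).head? with
        | none => rw [hf] at hv; simp at hv
        | some m =>
          rw [hf] at hv
          simp at hv
          have : m < k := pvCF_head_lt slots z k m hf
          omega
      · exact absurd hv (by simp)
    have h4 : ∀ z v, a4.getD z none = some v → v < (k : Int) := by
      intro z v hv
      rw [H4 z] at hv
      split at hv
      · cases hf : (pvCF slots z k).getLast? with
        | none => rw [hf] at hv; simp at hv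
        | some m =>
          rw [hf] at hv
          simp at hv
          have hmem : m ∈ pvCF slots z k := List.mem_of_getLast? hf
          have : m < k := by simpa using List.mem_of_mem_filter hmem
          omega
      · exact absurd hv (by simp)
    obtain ⟨K1, K2, K3, K4, P1, P2, P3, P4⟩ :=
      inner_fold slots k (pvW slots) a1 a2 a3 a4 h1 h2 h3 h4
    refine ⟨by rw [K1, L1], by rw [K2, L2], by rw [K3, L3], by rw [K4, L4], ?_, ?_, ?_, ?_⟩
    · intro z
      rw [P1 z]
      by_cases hz : z = k
      · subst hz
        rw [if_pos ⟨rfl, by rw [L1]; omega⟩, if_pos (by omega)]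
      · rw [if_neg (fun hcon => hz hcon.1), H1 z]
        have hiff : z < k + 1 ↔ z < k := by omega
        simp only [hiff]
    · intro z
      rw [P2 z]
      by_cases hz : z = k
      · subst hz
        rw [if_pos ⟨rfl, by rw [L2]; omega⟩, if_pos (by omega)]
      · rw [if_neg (fun hcon => hz hcon.1), H2 z]
        have hiff : z < k + 1 ↔ z < k := by omega
        simp only [hiff]
    · intro z
      by_cases hzw : z < pvW slots
      · by_cases hh : pvHas slots k z = true
        · rw [P3 z, if_pos ⟨hzw, by rw [L3]; exact hzw, hh⟩, H3 z, if_pos hzw,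
            if_pos hzw, pvCF_succ, if_pos hh, head?_append_or]
          cases (pvCF slots z k).head? with
          | none => simp
          | some m => simp
        · rw [P3 z, if_neg (by tauto), H3 z, if_pos hzw, if_pos hzw, pvCF_succ,
            if_neg hh, List.append_nil]
      · rw [P3 z, if_neg (by tauto), H3 z, if_neg hzw, if_neg hzw]
    · intro z
      by_cases hzw : z < pvW slots
      · by_cases hh : pvHas slots k z = true
        · rw [P4 z, if_pos ⟨hzw, by rw [L4]; exact hzw, hh⟩, if_pos hzw, pvCF_succ,
            if_pos hh, getLast?_append_or]
          simp
        · rw [P4 z, if_neg (by tauto), H4 z, if_pos hzw, if_pos hzw, pvCF_succ,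
            if_neg hh, List.append_nil]
      · rw [P4 z, if_neg (by tauto), H4 z, if_neg hzw, if_neg hzw]

-- ===== VERDICT (by name: the statement is the Claim_ definition above) =====
theorem getD_eq_get (l : List (Option Int)) (i : Nat) (h : i < l.length) :
    l.getD i none = l[i] := by
  rw [List.getD_eq_getElem?_getD, List.getElem?_eq_getElem h]; rfl

theorem row_col_extrema_py_spec : Claim_equal_row_col_extrema_py := by
  intro slots _ _
  unfold Spec_row_col_extrema_py
  obtain ⟨L1, L2, L3, L4, H1, H2, H3, H4⟩ := outer_fold slots slots.length le_rfl
  simp only [row_col_extrema_py, row_col_extrema_py_alt, List.map_map]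
  refine Prod.ext ?_ (Prod.ext ?_ (Prod.ext ?_ ?_))
  · apply List.ext_getElem
    · rw [L1]; simp
    · intro i hi1 hi2
      have hih : i < slots.length := by rwa [L1] at hi1
      rw [← getD_eq_get _ i hi1, H1 i, if_pos hih]
      simp [pvFirstLast, pvRF]
  · apply List.ext_getElem
    · rw [L2]; simp
    · intro i hi1 hi2
      have hih : i < slots.length := by rwa [L2] at hi1
      rw [← getD_eq_get _ i hi1, H2 i, if_pos hih]
      simp [pvFirstLast, pvRF]
  · apply List.ext_getElem
    · rw [L3]; simp
    · intro i hi1 hi2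
      have hih : i < pvW slots := by rwa [L3] at hi1
      rw [← getD_eq_get _ i hi1, H3 i, if_pos hih]
      simp [pvFirstLast, pvCF]
  · apply List.ext_getElem
    · rw [L4]; simp
    · intro i hi1 hi2
      have hih : i < pvW slots := by rwa [L4] at hi1
      rw [← getD_eq_get _ i hi1, H4 i, if_pos hih]
      simp [pvFirstLast, pvCF]
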